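-- pv_equiv track=rewrite | github.com/KerimDundar/NobetciProgram | desktop_app/roster_logic.py | rotate_roster_back
-- ===== SOURCE A (Python) =====
-- from typing import List, Optional, Tuple
--
-- def rotate_roster_back(roster: List[List[str]]) -> List[List[str]]:
--     """
--     Inverse of rotate_roster: move each day-column roster one step back.
--     """
--     if not roster:
--         return []
--
--     rows = len(roster)
--     cols = 5
--     new_roster = [row[:] for row in roster]
--
--     for c in range(cols):
--         indices = [r for r in range(rows) if (roster[r][c] or "").strip()]
--         names = [roster[r][c] for r in indices]
--         if not names:
--             continue
--         rotated = names[-1:] + names[:-1]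
--         for r, name in zip(indices, rotated):
--             new_roster[r][c] = name
--
--     return new_roster
-- ===== SOURCE B (Python) =====
-- def rotate_roster_back(roster):
--     """Streaming carry pass per column instead of building indices/names/rotated lists."""
--     if not roster:
--         return []
--     rows = len(roster)
--     new_roster = [row[:] for row in roster]
--     for c in range(5):
--         carry = None
--         for r in range(rows):
--             if (roster[r][c] or "").strip():
--                 carry = roster[r][c]
--         if carry is None:
--             continue
--         for r in range(rows):
--             if (roster[r][c] or "").strip():
--                 cur = roster[r][c]
--                 new_roster[r][c] = carry
--                 carry = cur
--     return new_roster
-- ===== Notes on version B (the rewrite author's own statement) =====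
-- stated objective: alternative
-- what changed: Replaces the per-column indices/names/rotated list construction and zip-write with two streaming scans per column: one scan to find the last filled cell (the wraparound seed) and one forward carry pass that swaps the carry into each filled cell, building no intermediate lists.
import Mathlib
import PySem

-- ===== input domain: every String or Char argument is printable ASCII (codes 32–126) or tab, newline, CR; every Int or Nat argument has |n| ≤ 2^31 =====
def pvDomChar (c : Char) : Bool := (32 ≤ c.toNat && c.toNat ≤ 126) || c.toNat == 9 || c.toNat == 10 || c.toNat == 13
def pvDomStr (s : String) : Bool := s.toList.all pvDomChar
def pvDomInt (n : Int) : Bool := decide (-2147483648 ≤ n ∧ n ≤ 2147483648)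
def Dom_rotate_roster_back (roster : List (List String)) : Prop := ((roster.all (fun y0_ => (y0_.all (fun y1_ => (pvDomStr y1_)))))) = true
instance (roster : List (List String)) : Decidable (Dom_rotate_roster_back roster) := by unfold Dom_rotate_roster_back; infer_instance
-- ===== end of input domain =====

-- B replaces A's per-column indices/names/rotated lists + zip by two streaming scans with a
-- carry variable (same asymptotic cost; a different decomposition). Return-value equivalence only.

-- cell lookup roster[r][c]; in-range under Pre_ (exact there)
def pvCell (roster : List (List String)) (r c : Nat) : String :=
  (roster.getD r []).getD c ""

-- truthiness of (cell or "").strip()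
def pvFilled (s : String) : Bool := PySem.Str.strip s != ""

-- new_roster[r][c] = v (r, c in range under Pre_)
def pvSetCell (m : List (List String)) (r c : Nat) (v : String) : List (List String) :=
  m.mapIdx (fun i row => if i = r then row.set c v else row)

-- ===== PORT A =====
def rotate_roster_back (roster : List (List String)) : List (List String) :=
  if roster = [] then []
  else
    let rows := roster.length
    let new0 := roster.map (fun row => row)
    (List.range 5).foldl (fun nr c =>
      let indices := (List.range rows).filter (fun r => pvFilled (pvCell roster r c))
      let names := indices.map (fun r => pvCell roster r c)
      if names = [] then nr
      else
        let rotated := names.drop (names.length - 1) ++ names.dropLast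
        (indices.zip rotated).foldl (fun nr2 (p : Nat × String) => pvSetCell nr2 p.1 c p.2) nr)
      new0

-- ===== PORT B =====
def rotate_roster_back_alt (roster : List (List String)) : List (List String) :=
  if roster = [] then []
  else
    let rows := roster.length
    let new0 := roster.map (fun row => row)
    (List.range 5).foldl (fun nr c =>
      let carry := (List.range rows).foldl (fun acc r =>
          if pvFilled (pvCell roster r c) then some (pvCell roster r c) else acc)
          (none : Option String)
      match carry with
      | none => nr
      | some k =>
        ((List.range rows).foldl (fun (st : List (List String) × String) r =>
            if pvFilled (pvCell roster r c) then (pvSetCell st.1 r c st.2, pvCell roster r c)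
            else st) (nr, k)).1)
      new0

-- ===== PRECONDITION & SPEC =====
-- A raises IndexError on roster[r][c] when some row has fewer than 5 cells; Pre_ excludes exactly that.
def Pre_rotate_roster_back (roster : List (List String)) : Prop :=
  ∀ row ∈ roster, 5 ≤ row.length
instance (roster : List (List String)) : Decidable (Pre_rotate_roster_back roster) := by
  unfold Pre_rotate_roster_back; infer_instance

def pvWitness_rotate_roster_back : List (List String) :=
  [["a", "", "b", " ", "c"], ["d", "e", "", "f", "g"]]

def Spec_rotate_roster_back (roster : List (List String)) (out : List (List String)) : Prop := out = rotate_roster_back_alt roster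
instance (roster : List (List String)) (out : List (List String)) : Decidable (Spec_rotate_roster_back roster out) := by unfold Spec_rotate_roster_back; infer_instance

-- ===== CLAIM (what is proved, stated in full; the proofs are below) =====
def Claim_equal_rotate_roster_back : Prop := ∀ (roster : List (List String)), Dom_rotate_roster_back roster → Pre_rotate_roster_back roster → Spec_rotate_roster_back roster (rotate_roster_back roster)

-- ===== LEMMAS AND PROOFS =====

-- a foldl whose step does nothing off a predicate is a foldl over the filtered list
theorem pv_foldl_filter {α σ : Type} (p : α → Bool) (g : σ → α → σ) :
    ∀ (l : List α) (init : σ),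
      l.foldl (fun s x => if p x then g s x else s) init = (l.filter p).foldl g init := by
  intro l
  induction l with
  | nil => intro init; rfl
  | cons a t ih =>
    intro init
    by_cases h : p a = true
    · simp [List.foldl, List.filter, h, ih]
    · simp [List.foldl, List.filter, h, ih]

-- a "keep the latest" scan computes the last element's image
theorem pv_foldl_last {α β : Type} (f : α → β) :
    ∀ (l : List α) (acc : Option β),
      l.foldl (fun _ x => some (f x)) acc
        = (match l.getLast? with | some x => some (f x) | none => acc) := by
  intro l
  induction l with
  | nil => intro acc; rfl
  | cons a t ih =>
    intro acc
    cases t with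
    | nil => rfl
    | cons b u => simpa [List.foldl] using ih (some (f a))

-- the carry pass over idx writes (idx.zip (k :: idx.map f)) into the matrix
theorem pv_carry_pass (roster : List (List String)) (c : Nat) :
    ∀ (idx : List Nat) (m : List (List String)) (k : String),
      (idx.foldl (fun (st : List (List String) × String) r =>
          (pvSetCell st.1 r c st.2, pvCell roster r c)) (m, k)).1
        = (idx.zip (k :: idx.map (fun r => pvCell roster r c))).foldl
            (fun nr2 (p : Nat × String) => pvSetCell nr2 p.1 c p.2) m := by
  intro idx
  induction idx with
  | nil => intro m k; rfl
  | cons r t ih =>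
    intro m k
    simp only [List.foldl, List.map, List.zip_cons_cons]
    exact ih (pvSetCell m r c k) (pvCell roster r c)

-- zips agree when the right sides agree on the first (length of left) elements
theorem pv_zip_take {α β : Type} :
    ∀ (l : List α) (ys zs : List β),
      ys.take l.length = zs.take l.length → l.zip ys = l.zip zs := by
  intro l
  induction l with
  | nil => intro ys zs _; simp
  | cons a t ih =>
    intro ys zs h
    cases ys with
    | nil => cases zs with
      | nil => rfl
      | cons z zt => simp at h
    | cons y yt =>
      cases zs with
      | nil => simp at h
      | cons z zt =>
        simp at h
        simp [List.zip_cons_cons, h.1, ih yt zt h.2]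

-- A's rotated zip equals B's (last :: names) zip
theorem pv_zip_rot (idx : List Nat) (names : List String) (hne : names ≠ [])
    (hlen : idx.length = names.length) :
    idx.zip (names.drop (names.length - 1) ++ names.dropLast)
      = idx.zip (names.getLast hne :: names) := by
  have hdrop : names.drop (names.length - 1) = [names.getLast hne] := by
    conv_lhs => rw [← List.dropLast_append_getLast hne]
    rw [List.drop_append_of_le_length (by simp [List.length_dropLast])]
    simp [List.length_dropLast]
  rw [hdrop]
  apply pv_zip_take
  have h1 : names.length - 1 + 1 = names.length := by
    cases names with
    | nil => exact absurd rfl hne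
    | cons a t => simp
  simp only [hlen]
  rw [show names.length = names.length - 1 + 1 from h1.symm]
  simp [List.take_succ_cons, List.dropLast_eq_take, List.take_take]

-- foldl respects pointwise equal step functions
theorem pv_foldl_ext {α σ : Type} (f g : σ → α → σ) (h : ∀ s x, f s x = g s x) :
    ∀ (l : List α) (init : σ), l.foldl f init = l.foldl g init := by
  intro l
  induction l with
  | nil => intro init; rfl
  | cons a t ih => intro init; simp only [List.foldl, h, ih]

-- the two column bodies agree
theorem pv_col_eq (roster : List (List String)) (nr : List (List String)) (c : Nat) :
    (let indices := (List.range roster.length).filter (fun r => pvFilled (pvCell roster r c))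
     let names := indices.map (fun r => pvCell roster r c)
     if names = [] then nr
     else
       let rotated := names.drop (names.length - 1) ++ names.dropLast
       (indices.zip rotated).foldl (fun nr2 (p : Nat × String) => pvSetCell nr2 p.1 c p.2) nr)
    = (let carry := (List.range roster.length).foldl (fun acc r =>
          if pvFilled (pvCell roster r c) then some (pvCell roster r c) else acc)
          (none : Option String)
       match carry with
       | none => nr
       | some k =>
         ((List.range roster.length).foldl (fun (st : List (List String) × String) r =>
             if pvFilled (pvCell roster r c) then (pvSetCell st.1 r c st.2, pvCell roster r c)
             else st) (nr, k)).1) := by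
  set idx := (List.range roster.length).filter (fun r => pvFilled (pvCell roster r c)) with hidx
  set names := idx.map (fun r => pvCell roster r c) with hnames
  have hcarry : (List.range roster.length).foldl (fun acc r =>
      if pvFilled (pvCell roster r c) then some (pvCell roster r c) else acc)
      (none : Option String)
      = (match idx.getLast? with
         | some x => some (pvCell roster x c)
         | none => (none : Option String)) := by
    rw [pv_foldl_filter (fun r => pvFilled (pvCell roster r c))
          (fun acc r => some (pvCell roster r c)), ← hidx,
        pv_foldl_last (fun r => pvCell roster r c)]
    cases idx.getLast? <;> rfl
  have hpass : ∀ k, ((List.range roster.length).foldl (fun (st : List (List String) × String) r =>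
      if pvFilled (pvCell roster r c) then (pvSetCell st.1 r c st.2, pvCell roster r c)
      else st) (nr, k)).1
      = (idx.zip (k :: names)).foldl (fun nr2 (p : Nat × String) => pvSetCell nr2 p.1 c p.2) nr := by
    intro k
    rw [pv_foldl_filter (fun r => pvFilled (pvCell roster r c))
          (fun (st : List (List String) × String) r => (pvSetCell st.1 r c st.2, pvCell roster r c)),
        ← hidx, pv_carry_pass]
  cases hidxl : idx.getLast? with
  | none =>
    have hnil : idx = [] := List.getLast?_eq_none_iff.mp hidxl
    rw [hcarry, hidxl]
    simp [hnil]
  | some x =>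
    have hne : idx ≠ [] := by
      intro h; rw [h] at hidxl; simp at hidxl
    have hnne : names ≠ [] := by simp [hnames, hne]
    have hlen : idx.length = names.length := by simp [hnames]
    have hlast : names.getLast hnne = pvCell roster x c := by
      have h1 := List.getLast?_eq_some_getLast hnne
      have hmap : names.getLast? = some (pvCell roster x c) := by
        rw [hnames, List.getLast?_map, hidxl]; rfl
      rw [hmap] at h1; exact ((Option.some.injEq _ _).mp h1).symm
    rw [hcarry, hidxl]
    simp only [← hnames]
    rw [if_neg hnne, hpass, pv_zip_rot idx names hnne hlen, hlast]

-- ===== VERDICT (by name: the statement is the Claim_ definition above) =====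
theorem rotate_roster_back_spec : Claim_equal_rotate_roster_back := by
  intro roster _ _
  unfold Spec_rotate_roster_back rotate_roster_back rotate_roster_back_alt
  by_cases h : roster = []
  · simp [h]
  · simp only [if_neg h]
    exact pv_foldl_ext _ _ (fun nr c => pv_col_eq roster nr c) (List.range 5) _
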